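-- pv_equiv track=rewrite | github.com/P13LIAM/KU01-online-test | 01_numcode/numcode.py | transform_x2y
-- ===== SOURCE A (Python) =====
-- def transform_x2y(N: int, binary_list: list):
--     y_list = []
--     for i, e in enumerate(binary_list):
--         e = int(e)
--         if i == 0:
--             y_i = N + (-1)**(e+1)
--         else:
--             y_i_lag = y_list[-1]
--             y_i = y_i_lag + (-1)**(e+1)
--
--         y_list.append(y_i)
--
--     return y_list
-- ===== SOURCE B (Python) =====
-- def transform_x2y(N: int, binary_list: list):
--     # divide-and-conquer scan: solve each half recursively, seeding the right
--     # half with the last value of the left half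
--     def scan(total, elems):
--         if not elems:
--             return []
--         if len(elems) == 1:
--             return [total + (-1) ** (int(elems[0]) + 1)]
--         mid = len(elems) // 2
--         left = scan(total, elems[:mid])
--         right = scan(left[-1], elems[mid:])
--         return left + right
--     return scan(N, binary_list)
-- ===== Notes on version B (the rewrite author's own statement) =====
-- stated objective: alternative
-- what changed: Replaces A's forward prefix loop (enumerate, i==0 branch, y_list[-1] self-indexing) by a divide-and-conquer scan: each half of the list is solved recursively and the right half is seeded with the last value of the left half.
-- outside the precondition, e.g. on transform_x2y(0, [-2]): A returns [-1.0], B returns [-1.0]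
import Mathlib
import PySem

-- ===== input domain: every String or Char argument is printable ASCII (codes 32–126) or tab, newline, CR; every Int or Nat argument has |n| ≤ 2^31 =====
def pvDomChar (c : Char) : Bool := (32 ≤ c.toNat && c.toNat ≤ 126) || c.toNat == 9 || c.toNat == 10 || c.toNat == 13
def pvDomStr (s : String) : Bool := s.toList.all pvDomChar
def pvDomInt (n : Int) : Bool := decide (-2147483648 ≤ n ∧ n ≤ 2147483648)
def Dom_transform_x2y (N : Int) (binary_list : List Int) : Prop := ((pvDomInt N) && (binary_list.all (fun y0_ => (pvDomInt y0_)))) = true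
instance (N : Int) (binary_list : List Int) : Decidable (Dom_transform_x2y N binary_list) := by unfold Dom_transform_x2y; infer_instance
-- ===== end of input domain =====

-- B replaces A's forward prefix loop by a divide-and-conquer scan: each half is solved
-- recursively and the right half is seeded with the last value of the left half.

-- ===== PORT A =====
def transform_x2y (N : Int) (binary_list : List Int) : List Int :=
  (PySem.List.enumerate binary_list 0).foldl (fun y_list ie =>
    let y_i : Int :=
      if ie.1 = 0 then N + (-1) ^ (ie.2 + 1).toNat
      else ((PySem.List.pyGet? y_list (-1)).getD 0) + (-1) ^ (ie.2 + 1).toNat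
    y_list ++ [y_i]) []

-- ===== PORT B =====
-- Source B's inner helper 'scan' (divide and conquer); the fuel argument (= initial list
-- length, strictly more than the recursion depth) only makes the recursion structural
def pvScan : Nat → Int → List Int → List Int
  | 0, _, _ => []
  | fuel + 1, total, elems =>
    if elems = [] then []
    else if elems.length = 1 then
      [total + (-1) ^ (((PySem.List.pyGet? elems 0).getD 0) + 1).toNat]
    else
      let mid := PySem.Int.floordiv (elems.length : Int) 2
      let left := pvScan fuel total (PySem.List.slice elems none (some mid))
      let right := pvScan fuel ((PySem.List.pyGet? left (-1)).getD 0)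
        (PySem.List.slice elems (some mid) none)
      left ++ right

def transform_x2y_alt (N : Int) (binary_list : List Int) : List Int :=
  pvScan binary_list.length N binary_list

-- ===== PRECONDITION & SPEC =====
-- Pre_ excludes lists with an element ≤ -2: there Python's (-1)**(e+1) has a negative exponent and
-- A returns FLOATS (outside the declared int-list type), so nothing of the claimed type is returned.
def Pre_transform_x2y (N : Int) (binary_list : List Int) : Prop :=
  ∀ e ∈ binary_list, -1 ≤ e
instance (N : Int) (binary_list : List Int) : Decidable (Pre_transform_x2y N binary_list) := by
  unfold Pre_transform_x2y; infer_instance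

def pvWitness_transform_x2y : Int × List Int := (5, [0, 1, 1, -1, 2, 3])

def Spec_transform_x2y (N : Int) (binary_list : List Int) (out : List Int) : Prop := out = transform_x2y_alt N binary_list
instance (N : Int) (binary_list : List Int) (out : List Int) : Decidable (Spec_transform_x2y N binary_list out) := by unfold Spec_transform_x2y; infer_instance

-- ===== CLAIM (what is proved, stated in full; the proofs are below) =====
def Claim_equal_transform_x2y : Prop := ∀ (N : Int) (binary_list : List Int), Dom_transform_x2y N binary_list → Pre_transform_x2y N binary_list → Spec_transform_x2y N binary_list (transform_x2y N binary_list)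

-- ===== LEMMAS AND PROOFS =====

-- reference forward scan: successive running totals over a delta list
def pvGo (t : Int) : List Int → List Int
  | [] => []
  | d :: ds => (t + d) :: pvGo (t + d) ds

-- A's fold, from index k ≥ 1 with a nonempty accumulator ending in t, produces the forward scan
theorem pvA_loop (es : List Int) (k : Int) (pre : List Int) (t : Int) (hk : 1 ≤ k) :
    (PySem.List.enumerate es k).foldl (fun y_list ie =>
        let y_i : Int :=
          if ie.1 = 0 then N₀ + (-1) ^ (ie.2 + 1).toNat
          else ((PySem.List.pyGet? y_list (-1)).getD 0) + (-1) ^ (ie.2 + 1).toNat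
        y_list ++ [y_i]) (pre ++ [t])
      = (pre ++ [t]) ++ pvGo t (es.map (fun e => (-1) ^ (e + 1).toNat)) := by
  induction es generalizing k pre t with
  | nil => simp [PySem.List.enumerate_nil, pvGo]
  | cons e es ih =>
    rw [PySem.List.enumerate_cons]
    have hne : ¬ (k = 0) := by omega
    simp only [List.foldl, hne, if_false, PySem.List.pyGet?_neg_one_append_singleton,
      Option.getD_some]
    have := ih (k + 1) (pre ++ [t]) (t + (-1) ^ (e + 1).toNat) (by omega)
    simp only [List.append_assoc] at this ⊢
    rw [this]
    simp [pvGo]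

theorem pvA_go (N : Int) (bl : List Int) :
    transform_x2y N bl = pvGo N (bl.map (fun e => (-1) ^ (e + 1).toNat)) := by
  cases bl with
  | nil => simp [transform_x2y, PySem.List.enumerate_nil, pvGo]
  | cons e es =>
    unfold transform_x2y
    rw [PySem.List.enumerate_cons]
    simp only [List.foldl, if_true, List.nil_append]
    have := pvA_loop (N₀ := N) es 1 [] (N + (-1) ^ (e + 1).toNat) (by omega)
    simp only [List.nil_append] at this
    simpa [pvGo] using this

-- pvGo splits over append, reseeding with the accumulated sum
theorem pvGo_append (ds1 ds2 : List Int) (t : Int) :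
    pvGo t (ds1 ++ ds2) = pvGo t ds1 ++ pvGo (t + ds1.sum) ds2 := by
  induction ds1 generalizing t with
  | nil => simp [pvGo]
  | cons d ds1 ih =>
    simp only [List.cons_append, pvGo, ih, List.sum_cons]
    rw [show t + (d + ds1.sum) = t + d + ds1.sum from by ring]

-- the last element of a nonempty scan is the seed plus the total sum
theorem pvGo_getLast (t : Int) (ds : List Int) (h : ds ≠ []) :
    (pvGo t ds).getLast? = some (t + ds.sum) := by
  induction ds generalizing t with
  | nil => simp at h
  | cons d ds ih =>
    cases ds with
    | nil => simp [pvGo]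
    | cons d' ds' =>
      rw [show pvGo t (d :: d' :: ds') = (t + d) :: pvGo (t + d) (d' :: ds') from rfl]
      rw [show pvGo (t + d) (d' :: ds') = (t + d + d') :: pvGo (t + d + d') ds' from rfl,
        List.getLast?_cons_cons,
        ← show pvGo (t + d) (d' :: ds') = (t + d + d') :: pvGo (t + d + d') ds' from rfl,
        ih (t + d) (by simp)]
      simp only [List.sum_cons, Option.some.injEq]
      ring

-- B's divide-and-conquer scan computes the forward scan of the step values
theorem pvScan_eq_aux (m : Nat) : ∀ (elems : List Int), elems.length ≤ m → ∀ (total : Int),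
    pvScan m total elems = pvGo total (elems.map (fun e => (-1) ^ (e + 1).toNat)) := by
  induction m with
  | zero =>
    intro elems hle total
    have h : elems = [] := by
      cases elems with
      | nil => rfl
      | cons a l => simp at hle
    subst h
    simp [pvScan, pvGo]
  | succ m ih =>
    intro elems hle total
    by_cases h0 : elems = []
    · subst h0; simp [pvScan, pvGo]
    · by_cases h1 : elems.length = 1
      · obtain ⟨e, rfl⟩ : ∃ e, elems = [e] := by
          cases elems with
          | nil => exact absurd rfl h0
          | cons a l =>
            cases l with
            | nil => exact ⟨a, rfl⟩
            | cons b l' => simp at h1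
        simp [pvScan, pvGo]
      · have h2 : 2 ≤ elems.length := by
          have := List.length_pos_of_ne_nil h0; omega
        have hmid : PySem.Int.floordiv ((elems.length : Nat) : Int) 2
            = ((elems.length / 2 : Nat) : Int) :=
          by exact_mod_cast PySem.Int.floordiv_natCast elems.length 2
        rw [pvScan]
        simp only [h0, h1, if_neg, not_false_iff, hmid,
          PySem.List.slice_to_natCast, PySem.List.slice_from_natCast]
        have ht : (elems.take (elems.length / 2)).length ≤ m := by
          simp only [List.length_take]; omega
        have hd : (elems.drop (elems.length / 2)).length ≤ m := by
          simp only [List.length_drop]; omega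
        rw [ih _ ht, ih _ hd]
        have hne : (elems.take (elems.length / 2)).map
            (fun e => (-1 : Int) ^ (e + 1).toNat) ≠ [] := by
          simp only [ne_eq, List.map_eq_nil_iff]
          exact List.ne_nil_of_length_pos (by simp only [List.length_take]; omega)
        rw [PySem.List.pyGet?_neg_one, pvGo_getLast _ _ hne, Option.getD_some,
          ← pvGo_append, ← List.map_append, List.take_append_drop]

theorem pvScan_eq (elems : List Int) (total : Int) :
    pvScan elems.length total elems = pvGo total (elems.map (fun e => (-1) ^ (e + 1).toNat)) :=
  pvScan_eq_aux elems.length elems le_rfl total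

-- ===== VERDICT (by name: the statement is the Claim_ definition above) =====
theorem transform_x2y_spec : Claim_equal_transform_x2y := by
  intro N bl _ _
  unfold Spec_transform_x2y transform_x2y_alt
  rw [pvA_go, pvScan_eq]
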